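-- pv_equiv track=rewrite | github.com/Yldrax/everybody-codes | 2025/quest_06.py | calc_sword_pairs
-- ===== SOURCE A (Python) =====
-- def calc_sword_pairs(notes: str) -> int:
--     total = 0
--     mentors = 0
--     for n in notes:
--         match n:
--             case "A":
--                 mentors += 1
--             case "a":
--                 total += mentors
--     return total
-- ===== SOURCE B (Python) =====
-- def calc_sword_pairs(notes: str) -> int:
--     # Phase 1: build an explicit prefix table of running 'A' counts.
--     prefix = []
--     running = 0
--     for c in notes:
--         running += 1 if c == "A" else 0
--         prefix.append(running)
--     # Phase 2: sum the prefix count at every position holding an 'a'.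
--     return sum(p for c, p in zip(notes, prefix) if c == "a")
-- ===== Notes on version B (the rewrite author's own statement) =====
-- stated objective: alternative
-- what changed: Replaces the fused online loop carrying two counters by a two-phase decomposition: first build an explicit prefix table of running 'A' counts, then sum the table entries at the positions of 'a'.
import Mathlib
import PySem

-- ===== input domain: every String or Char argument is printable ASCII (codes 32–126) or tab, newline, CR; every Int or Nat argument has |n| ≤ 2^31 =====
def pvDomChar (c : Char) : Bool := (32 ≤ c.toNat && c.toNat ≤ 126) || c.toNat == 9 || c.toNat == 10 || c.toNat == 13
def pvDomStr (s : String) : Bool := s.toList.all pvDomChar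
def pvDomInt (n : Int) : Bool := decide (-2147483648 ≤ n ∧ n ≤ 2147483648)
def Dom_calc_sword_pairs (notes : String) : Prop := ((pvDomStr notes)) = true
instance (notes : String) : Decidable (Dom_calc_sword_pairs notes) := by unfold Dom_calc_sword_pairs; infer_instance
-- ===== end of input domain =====

-- B replaces A's fused two-counter loop by a prefix-count table plus a filtered summation pass (alternative decomposition, same cost).

-- ===== PORT A =====
def calc_sword_pairs (notes : String) : Int :=
  let st := notes.toList.foldl
    (fun (st : Int × Int) n =>
      if n = 'A' then (st.1, st.2 + 1)
      else if n = 'a' then (st.1 + st.2, st.2)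
      else st)
    (0, 0)
  st.1

-- ===== PORT B =====
-- phase 1: running 'A' counts, appended one by one (the explicit prefix table of Source B)
def pvPrefixA : List Char → Int → List Int
  | [], _ => []
  | c :: rest, running =>
    let r := running + (if c = 'A' then 1 else 0)
    r :: pvPrefixA rest r

def calc_sword_pairs_alt (notes : String) : Int :=
  let pfx := pvPrefixA notes.toList 0
  (((notes.toList.zip pfx).filter (fun p => p.1 = 'a')).map (fun p => p.2)).foldl (· + ·) 0

-- ===== PRECONDITION & SPEC =====
def Spec_calc_sword_pairs (notes : String) (out : Int) : Prop := out = calc_sword_pairs_alt notes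
instance (notes : String) (out : Int) : Decidable (Spec_calc_sword_pairs notes out) := by unfold Spec_calc_sword_pairs; infer_instance

-- ===== CLAIM (what is proved, stated in full; the proofs are below) =====
def Claim_equal_calc_sword_pairs : Prop := ∀ (notes : String), Dom_calc_sword_pairs notes → Spec_calc_sword_pairs notes (calc_sword_pairs notes)

-- ===== LEMMAS AND PROOFS =====

-- B's second pass, as a function of the remaining list and the running count
def pvSumB (l : List Char) (run : Int) : Int :=
  (((l.zip (pvPrefixA l run)).filter (fun p => p.1 = 'a')).map (fun p => p.2)).foldl (· + ·) 0

theorem pv_foldl_add_shift (L : List Int) (s : Int) :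
    L.foldl (· + ·) s = s + L.foldl (· + ·) 0 := by
  induction L generalizing s with
  | nil => simp
  | cons x xs ih =>
    simp only [List.foldl_cons]
    rw [ih (s + x), ih (0 + x)]
    ring

theorem pvSumB_cons (c : Char) (rest : List Char) (run : Int) :
    pvSumB (c :: rest) run =
      (if c = 'a' then run + (if c = 'A' then 1 else 0) else 0) +
        pvSumB rest (run + (if c = 'A' then 1 else 0)) := by
  simp only [pvSumB, pvPrefixA, List.zip_cons_cons, List.filter_cons]
  by_cases h : c = 'a'
  · simp [h]
    exact pv_foldl_add_shift _ _
  · simp [h]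

theorem pv_fold_eq (l : List Char) (t run : Int) :
    (l.foldl
      (fun (st : Int × Int) n =>
        if n = 'A' then (st.1, st.2 + 1)
        else if n = 'a' then (st.1 + st.2, st.2)
        else st)
      (t, run)).1 = t + pvSumB l run := by
  induction l generalizing t run with
  | nil => simp [pvSumB, pvPrefixA]
  | cons c rest ih =>
    simp only [List.foldl_cons]
    rw [pvSumB_cons]
    by_cases hA : c = 'A'
    · have : c ≠ 'a' := by simp [hA]
      simp only [hA]
      rw [ih]
      simp
    · by_cases ha : c = 'a'
      · simp only [if_neg hA, ha]
        rw [ih]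
        simp
        ring
      · simp only [if_neg hA, if_neg ha]
        rw [ih]
        simp

-- ===== VERDICT (by name: the statement is the Claim_ definition above) =====
theorem calc_sword_pairs_spec : Claim_equal_calc_sword_pairs := by
  intro notes _
  unfold Spec_calc_sword_pairs calc_sword_pairs calc_sword_pairs_alt
  rw [pv_fold_eq]
  simp [pvSumB]
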